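-- pv_equiv track=rewrite | github.com/LeeSeungYun1020/Algorithm | python/step/implementation/23291.py | check
-- ===== SOURCE A (Python) =====
-- def check(board, k):
--     mn = board[0][0]
--     mx = board[0][0]
--     for i in range(0, len(board)):
--         for j in range(0, len(board[i])):
--             if mn > board[i][j]:
--                 mn = board[i][j]
--             if mx < board[i][j]:
--                 mx = board[i][j]
--     return mx - mn <= k
-- ===== SOURCE B (Python) =====
-- def check(board, k):
--     flat = sorted(x for row in board for x in row)
--     return flat[-1] - flat[0] <= k
-- ===== Notes on version B (the rewrite author's own statement) =====
-- stated objective: alternative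
-- what changed: Replaces the running min/max index scan by flattening the grid into one list, sorting it, and comparing the sorted list's endpoints (last - first <= k).
import Mathlib
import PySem

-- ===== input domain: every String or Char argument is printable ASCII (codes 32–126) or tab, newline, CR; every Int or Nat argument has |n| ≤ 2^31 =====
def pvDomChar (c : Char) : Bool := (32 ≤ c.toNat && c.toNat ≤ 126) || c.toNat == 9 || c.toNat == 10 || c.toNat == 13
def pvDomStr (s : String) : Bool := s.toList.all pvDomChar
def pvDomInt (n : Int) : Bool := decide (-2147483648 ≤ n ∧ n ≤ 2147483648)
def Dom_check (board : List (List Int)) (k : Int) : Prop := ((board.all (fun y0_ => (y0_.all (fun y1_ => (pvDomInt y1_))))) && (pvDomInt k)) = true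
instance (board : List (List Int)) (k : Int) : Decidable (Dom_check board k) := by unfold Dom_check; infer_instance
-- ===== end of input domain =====

-- B replaces A's running min/max scan by flatten-sort-and-compare-endpoints (a different algorithm, not faster).

-- ===== PORT A =====
def check (board : List (List Int)) (k : Int) : Bool :=
  match PySem.List.pyGet? board 0 with
  | none => false  -- IndexError in Python; excluded by Pre_check
  | some row0 =>
    match PySem.List.pyGet? row0 0 with
    | none => false  -- IndexError in Python; excluded by Pre_check
    | some v =>
      let st := (PySem.List.pyRange 0 (PySem.List.len board) 1).foldl
        (fun st i =>
          let row := PySem.List.pyGetD board i []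
          (PySem.List.pyRange 0 (PySem.List.len row) 1).foldl
            (fun st j =>
              let x := PySem.List.pyGetD row j 0
              (if st.1 > x then x else st.1, if st.2 < x then x else st.2)) st)
        (v, v)
      decide (st.2 - st.1 ≤ k)

-- ===== PORT B =====
def check_alt (board : List (List Int)) (k : Int) : Bool :=
  let flat := PySem.List.sorted (board.flatMap (fun row => row)) (fun x => x) false
  match PySem.List.pyGet? flat (-1), PySem.List.pyGet? flat 0 with
  | some hi, some lo => decide (hi - lo ≤ k)
  | _, _ => false  -- IndexError in Python (empty board); outside Pre_check

-- ===== PRECONDITION & SPEC =====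
-- Pre_ excludes exactly the inputs where A raises IndexError: an empty board or an empty first row.
def Pre_check (board : List (List Int)) (k : Int) : Prop :=
  0 < board.length ∧ 0 < (board.getD 0 []).length
instance (board : List (List Int)) (k : Int) : Decidable (Pre_check board k) := by
  unfold Pre_check; infer_instance
def pvWitness_check : List (List Int) × Int := ([[1, 3], [], [2]], 2)

def Spec_check (board : List (List Int)) (k : Int) (out : Bool) : Prop := out = check_alt board k
instance (board : List (List Int)) (k : Int) (out : Bool) : Decidable (Spec_check board k out) := by
  unfold Spec_check; infer_instance

-- ===== CLAIM (what is proved, stated in full; the proofs are below) =====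
def Claim_equal_check : Prop := ∀ (board : List (List Int)) (k : Int), Dom_check board k → Pre_check board k → Spec_check board k (check board k)
-- ===== LEMMAS AND PROOFS =====

-- A's nested index loops are a fold over the flattened board
theorem foldl_rows_eq_flatten (board : List (List Int)) (g : Int × Int → Int → Int × Int)
    (s : Int × Int) :
    board.foldl (fun st row => row.foldl g st) s = board.flatten.foldl g s := by
  induction board generalizing s with
  | nil => rfl
  | cons r rest ih => simp only [List.foldl_cons, List.flatten_cons, List.foldl_append, ih]

-- any member of a Pairwise-(≤) list is ≤ the element at a later (or equal) index is given
-- by PySem.List.sorted_id_getElem_mono; used below directly.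

-- ===== VERDICT (by name: the statement is the Claim_ definition above) =====
theorem check_spec : Claim_equal_check := by
  intro board k _ hpre
  unfold Spec_check
  obtain ⟨hb, hr⟩ := hpre
  cases board with
  | nil => simp at hb
  | cons r0 rest =>
    cases r0 with
    | nil => simp at hr
    | cons x xs =>
      unfold check check_alt
      simp only [PySem.List.pyGet?_zero_cons]
      -- A's state = (foldl min, foldl max) over the flattened board
      rw [PySem.List.foldl_pyRange_zero_pyGetD ((x :: xs) :: rest) []
        (fun st row =>
          (PySem.List.pyRange 0 (PySem.List.len row) 1).foldl
            (fun st j =>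
              (if st.1 > PySem.List.pyGetD row j 0 then PySem.List.pyGetD row j 0 else st.1,
               if st.2 < PySem.List.pyGetD row j 0 then PySem.List.pyGetD row j 0 else st.2)) st)
        (x, x)]
      have hinner : ∀ (row : List Int) (st : Int × Int),
          (PySem.List.pyRange 0 (PySem.List.len row) 1).foldl
            (fun st j =>
              (if st.1 > PySem.List.pyGetD row j 0 then PySem.List.pyGetD row j 0 else st.1,
               if st.2 < PySem.List.pyGetD row j 0 then PySem.List.pyGetD row j 0 else st.2)) st
          = row.foldl (fun s y => (min s.1 y, max s.2 y)) st := by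
        intro row st
        rw [PySem.List.foldl_pyRange_zero_pyGetD row 0
          (fun st y => (if st.1 > y then y else st.1, if st.2 < y then y else st.2)) st]
        refine PySem.List.foldl_congr_mem _ _ _ _ ?_
        intro acc y _
        simp only [Prod.mk.injEq]
        constructor <;> simp [min_def, max_def] <;> omega
      rw [PySem.List.foldl_congr_mem ((x :: xs) :: rest) _
        (fun st row => row.foldl (fun s y => (min s.1 y, max s.2 y)) st) (x, x)
        (fun acc row _ => hinner row acc)]
      rw [foldl_rows_eq_flatten]
      set flat := ((x :: xs) :: rest).flatten with hflat
      have hxflat : x ∈ flat := by simp [hflat]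
      rw [PySem.List.foldl_prod_mk min max flat x x]
      -- B's sorted list
      set S := PySem.List.sorted (((x :: xs) :: rest).flatMap (fun row => row)) (fun x => x) false
        with hS
      have hSperm : S.Perm flat := by
        rw [hS, hflat, List.flatMap_id']
        exact PySem.List.sorted_perm _ _ _
      have hSne : S ≠ [] := by
        intro h
        have := hSperm.length_eq
        rw [h] at this
        simp [hflat] at this
      -- evaluate B's two indexings
      obtain ⟨m, t, hmt⟩ := List.exists_cons_of_ne_nil hSne
      have hlen : 1 ≤ S.length := by rw [hmt]; simp
      have hget0 : PySem.List.pyGet? S 0 = some m := by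
        rw [hmt]; simp
      have hlt : S.length - 1 < S.length := by omega
      have hgetNeg : PySem.List.pyGet? S (-1) = some (S[S.length - 1]) := by
        simp only [PySem.List.pyGet?, PySem.List.pyIdx?, Int.reduceNeg, Int.neg_nonneg,
          Int.reduceLE, ↓reduceIte, neg_le_neg_iff, Nat.one_le_cast, neg_neg, Int.toNat_one]
        rw [if_pos hlen]
        simp [List.getElem?_eq_getElem hlt]
      rw [hget0, hgetNeg]
      have hflatmap : List.flatMap (fun row => row) ((x :: xs) :: rest) = flat := by
        rw [hflat]; exact List.flatMap_id'
      -- min side: foldl min x flat = m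
      obtain ⟨hmn_mem, hmn_le⟩ := List.min?_eq_some_iff.mp
        (rfl : (x :: flat).min? = some (flat.foldl min x))
      have hm_mem : m ∈ flat := hSperm.mem_iff.mp (by rw [hmt]; simp)
      have hsorted_eq : PySem.List.sorted (List.flatMap (fun row => row) ((x :: xs) :: rest))
          (fun x => x) = m :: t := by rw [← hS]; exact hmt
      have hm_le : ∀ y ∈ flat, m ≤ y := by
        intro y hy
        exact PySem.List.key_head_sorted_le _ (fun x => x) hsorted_eq y (by rwa [hflatmap])
      have hmn : flat.foldl min x = m := by
        apply le_antisymm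
        · exact hmn_le m (List.mem_cons_of_mem _ hm_mem)
        · apply hm_le
          rcases List.mem_cons.mp hmn_mem with h | h
          · rw [h]; exact hxflat
          · exact h
      -- max side: foldl max x flat = S[len-1]
      obtain ⟨hmx_mem, hmx_ge⟩ := List.max?_eq_some_iff.mp
        (rfl : (x :: flat).max? = some (flat.foldl max x))
      have hlast_mem : S[S.length - 1] ∈ flat := hSperm.mem_iff.mp (List.getElem_mem hlt)
      have hlast_ge : ∀ y ∈ flat, y ≤ S[S.length - 1] := by
        intro y hy
        have hyS : y ∈ S := hSperm.mem_iff.mpr hy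
        obtain ⟨p, hp, hpy⟩ := List.mem_iff_getElem.mp hyS
        rw [← hpy]
        exact PySem.List.sorted_id_getElem_mono (xs := ((x :: xs) :: rest).flatMap (fun row => row))
          (p := p) (q := S.length - 1) (by omega) (by rw [← hS]; omega)
      have hmx : flat.foldl max x = S[S.length - 1] := by
        apply le_antisymm
        · apply hlast_ge
          rcases List.mem_cons.mp hmx_mem with h | h
          · rw [h]; exact hxflat
          · exact h
        · exact hmx_ge _ (List.mem_cons_of_mem _ hlast_mem)
      rw [hmn, hmx]
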